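-- pv_equiv track=rewrite | github.com/sambaker54321/GRT-media-portrayals | Portrayal-of-travellers-in-national-and-local-press-updated.py | get_negative_headlines
-- ===== SOURCE A (Python) =====
-- def get_negative_headlines(headlines,words):
--     """
--     Extract negative headlines that include
--     negative words. Inputs are get_headlines()
--     data and words (list of strings). Returns
--     list of headlines with negative words.
--     """
--     negative_headlines = []
--     for headline in headlines:
--         for word in words:
--             if headline.lower().find(word) != -1: #If particular word is found in lowercased headline.
--                 negative_headlines.append(headline)
--                 break #Stop iterating through words when we have found one negative word.
--     return negative_headlines
-- ===== SOURCE B (Python) =====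
-- def get_negative_headlines(headlines, words):
--     """
--     Same result as A, but by loop interchange: lowercase each headline once,
--     then sweep the headlines once per word, marking matches in a flag array,
--     and finally emit the flagged headlines in their original order.
--     """
--     matched = [False] * len(headlines)
--     lowered = [h.lower() for h in headlines]
--     for word in words:
--         for i, low in enumerate(lowered):
--             if not matched[i] and word in low:
--                 matched[i] = True
--     return [h for h, m in zip(headlines, matched) if m]
-- ===== Notes on version B (the rewrite author's own statement) =====
-- stated objective: alternative
-- what changed: Loop interchange with a flag array: B lowercases each headline once up front, then for each word sweeps all headlines marking matches in a boolean array, and finally emits flagged headlines in order, instead of A's per-headline inner scan over words with break and a lower() call per (headline,word) pair.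
import Mathlib
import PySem

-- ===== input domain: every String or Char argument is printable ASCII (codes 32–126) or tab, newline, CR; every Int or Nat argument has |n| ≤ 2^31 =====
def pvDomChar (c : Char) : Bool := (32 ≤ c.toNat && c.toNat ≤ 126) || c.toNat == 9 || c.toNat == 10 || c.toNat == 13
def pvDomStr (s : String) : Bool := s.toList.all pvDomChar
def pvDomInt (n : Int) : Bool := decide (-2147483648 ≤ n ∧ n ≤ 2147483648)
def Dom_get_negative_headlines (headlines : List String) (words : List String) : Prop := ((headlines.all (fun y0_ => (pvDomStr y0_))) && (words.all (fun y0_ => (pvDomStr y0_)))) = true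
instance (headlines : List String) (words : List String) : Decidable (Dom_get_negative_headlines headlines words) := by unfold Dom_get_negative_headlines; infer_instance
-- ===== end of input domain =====

-- B replaces A's per-headline scan over words (with break) by a loop interchange: lowercase once per headline, a flag array updated word by word, then the flagged headlines in order. Objective: alternative.

-- ===== PORT A =====
-- inner 'for word in words: if headline.lower().find(word) != -1: append; break'
def pvInner (acc : List String) (h : String) : List String → List String
  | [] => acc
  | w :: ws =>
      if PySem.Str.find (PySem.Str.lower h) w ≠ -1 then acc ++ [h]
      else pvInner acc h ws

def get_negative_headlines (headlines : List String) (words : List String) : List String :=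
  headlines.foldl (fun acc h => pvInner acc h words) []

-- ===== PORT B =====
-- one sweep over the flag/lowered state for a single word
def pvMark (w : String) : List (Bool × String) → List (Bool × String)
  | [] => []
  | (b, low) :: rest =>
      ((if !b && PySem.Str.isIn w low then true else b), low) :: pvMark w rest

-- '[h for h, m in zip(headlines, matched) if m]'
def pvCollect : List String → List Bool → List String
  | h :: hs, m :: ms => if m then h :: pvCollect hs ms else pvCollect hs ms
  | _, _ => []

def get_negative_headlines_alt (headlines : List String) (words : List String) : List String :=
  let lowered := headlines.map PySem.Str.lower
  let st := words.foldl (fun s w => pvMark w s) (lowered.map (fun l => (false, l)))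
  pvCollect headlines (st.map (·.1))

-- ===== PRECONDITION & SPEC =====
def Spec_get_negative_headlines (headlines : List String) (words : List String) (out : List String) : Prop := out = get_negative_headlines_alt headlines words
instance (headlines : List String) (words : List String) (out : List String) : Decidable (Spec_get_negative_headlines headlines words out) := by unfold Spec_get_negative_headlines; infer_instance

-- ===== CLAIM (what is proved, stated in full; the proofs are below) =====
def Claim_equal_get_negative_headlines : Prop := ∀ (headlines : List String) (words : List String), Dom_get_negative_headlines headlines words → Spec_get_negative_headlines headlines words (get_negative_headlines headlines words)

-- ===== LEMMAS AND PROOFS =====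

-- the common predicate: some word occurs in the lowercased headline
def pvNeg (words : List String) (h : String) : Bool :=
  words.any (fun w => PySem.Str.isIn w (PySem.Str.lower h))

theorem pvInner_eq (acc : List String) (h : String) (ws : List String) :
    pvInner acc h ws = if pvNeg ws h then acc ++ [h] else acc := by
  induction ws with
  | nil => simp [pvInner, pvNeg]
  | cons w ws ih =>
      have key : (PySem.Str.find (PySem.Str.lower h) w ≠ -1) ↔ PySem.Str.isIn w (PySem.Str.lower h) = true :=
        ⟨fun hf => (PySem.Str.isIn_iff_infix _ _).mpr ((PySem.Str.find_ne_neg_one_iff _ _).mp hf),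
         fun hi => (PySem.Str.find_ne_neg_one_iff _ _).mpr ((PySem.Str.isIn_iff_infix _ _).mp hi)⟩
      rw [pvInner]
      by_cases hin : PySem.Str.isIn w (PySem.Str.lower h) = true
      · rw [if_pos (key.mpr hin)]
        simp at hin
        simp [pvNeg, hin]
      · rw [if_neg (fun hf => hin (key.mp hf)), ih]
        simp at hin
        simp [pvNeg, hin]

theorem pvFoldA (ws : List String) (hs : List String) (acc : List String) :
    hs.foldl (fun acc h => pvInner acc h ws) acc = acc ++ hs.filter (pvNeg ws) := by
  induction hs generalizing acc with
  | nil => simp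
  | cons h hs ih =>
      rw [List.foldl_cons, pvInner_eq, List.filter_cons]
      by_cases hp : pvNeg ws h = true
      · rw [if_pos hp, ih, if_pos hp]; simp
      · rw [if_neg hp, ih, if_neg hp]

theorem pvMark_map (w : String) (L : List (Bool × String)) :
    pvMark w L = L.map (fun p => (p.1 || PySem.Str.isIn w p.2, p.2)) := by
  induction L with
  | nil => rfl
  | cons p rest ih =>
      obtain ⟨b, low⟩ := p
      simp only [pvMark, List.map_cons, ih]
      cases b <;> simp

theorem pvFoldB (ws : List String) (L : List (Bool × String)) :
    ws.foldl (fun s w => pvMark w s) L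
      = L.map (fun p => (p.1 || ws.any (fun w => PySem.Str.isIn w p.2), p.2)) := by
  induction ws generalizing L with
  | nil => simp
  | cons w ws ih =>
      rw [List.foldl_cons, pvMark_map, ih, List.map_map]
      apply List.map_congr_left
      intro p _
      simp [Bool.or_assoc]

theorem pvCollect_eq (hs : List String) (f : String → Bool) :
    pvCollect hs (hs.map f) = hs.filter f := by
  induction hs with
  | nil => rfl
  | cons h hs ih =>
      simp only [List.map_cons, pvCollect, List.filter_cons]
      by_cases hp : f h = true <;> simp [hp, ih]

theorem alt_eq_filter (headlines words : List String) :
    get_negative_headlines_alt headlines words = headlines.filter (pvNeg words) := by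
  have hst : (words.foldl (fun s w => pvMark w s)
      ((headlines.map PySem.Str.lower).map (fun l => (false, l)))).map (·.1)
      = headlines.map (pvNeg words) := by
    rw [pvFoldB]
    simp [List.map_map, Function.comp, pvNeg]
  show pvCollect headlines ((words.foldl (fun s w => pvMark w s)
      ((headlines.map PySem.Str.lower).map (fun l => (false, l)))).map (·.1)) = _
  rw [hst, pvCollect_eq]

-- ===== VERDICT (by name: the statement is the Claim_ definition above) =====
theorem get_negative_headlines_spec : Claim_equal_get_negative_headlines := by
  intro headlines words _
  unfold Spec_get_negative_headlines get_negative_headlines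
  rw [alt_eq_filter, pvFoldA]
  simp
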